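-- pv_equiv track=rewrite | github.com/m-sirius-k/MoCKA | experiments/shadow/verify_all_shadow.py | trim_stdout
-- ===== SOURCE A (Python) =====
-- HEAD_TAIL_LINES = 5  # NOTE: stdout trim window size
--
-- def trim_stdout(lines, evidence_line_numbers):
--     total = len(lines)
--     if total <= HEAD_TAIL_LINES * 2:
--         return lines, False, total
--
--     head = list(range(0, HEAD_TAIL_LINES))
--     tail = list(range(total - HEAD_TAIL_LINES, total))
--     keep = set(head + tail + evidence_line_numbers)
--
--     kept = []
--     for i in sorted(keep):
--         if 0 <= i < total:
--             kept.append(lines[i])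
--
--     return kept, True, total
-- ===== SOURCE B (Python) =====
-- HEAD_TAIL_LINES = 5
--
--
-- def trim_stdout(lines, evidence_line_numbers):
--     total = len(lines)
--     if total <= HEAD_TAIL_LINES * 2:
--         return lines, False, total
--
--     ev = set(evidence_line_numbers)
--     kept = [line for i, line in enumerate(lines)
--             if i < HEAD_TAIL_LINES or i >= total - HEAD_TAIL_LINES or i in ev]
--     return kept, True, total
-- ===== Notes on version B (the rewrite author's own statement) =====
-- stated objective: simpler
-- what changed: Replaces the build-keep-set/sort/gather-by-index shape with a single filtered scan over enumerate(lines), which keeps ascending order and deduplication for free and drops out-of-range evidence indices because only valid indices are visited.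
import Mathlib
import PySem

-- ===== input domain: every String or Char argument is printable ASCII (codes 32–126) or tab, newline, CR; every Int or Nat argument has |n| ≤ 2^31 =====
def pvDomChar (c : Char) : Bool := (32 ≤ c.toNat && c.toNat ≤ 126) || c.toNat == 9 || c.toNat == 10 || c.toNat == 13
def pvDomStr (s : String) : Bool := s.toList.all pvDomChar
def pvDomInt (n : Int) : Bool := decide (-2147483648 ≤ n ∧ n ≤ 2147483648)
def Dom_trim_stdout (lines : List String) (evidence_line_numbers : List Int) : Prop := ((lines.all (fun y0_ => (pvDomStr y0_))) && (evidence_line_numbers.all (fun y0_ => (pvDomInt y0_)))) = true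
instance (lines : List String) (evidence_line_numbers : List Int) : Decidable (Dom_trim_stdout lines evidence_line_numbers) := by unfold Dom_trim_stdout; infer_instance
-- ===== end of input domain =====

-- B replaces A's build-keep-set / sort / gather-by-index shape with one filtered scan over
-- enumerate(lines) (objective: simpler).

-- ===== PORT A =====
def trim_stdout (lines : List String) (evidence_line_numbers : List Int) : List String × Bool × Int :=
  let total : Int := lines.length
  if total ≤ 5 * 2 then (lines, false, total)
  else
    let head := PySem.List.pyRange 0 5 1
    let tail := PySem.List.pyRange (total - 5) total 1
    let keep : PySem.Set Int := PySem.Set.ofList (head ++ tail ++ evidence_line_numbers)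
    -- the loop appends lines[i]; the guard 0 ≤ i < total makes the index in range, so pyGetD is exact
    let kept := (PySem.List.sorted keep (fun x => x) false).foldl
      (fun acc i => if 0 ≤ i ∧ i < total then acc ++ [PySem.List.pyGetD lines i ""] else acc) []
    (kept, true, total)

-- ===== PORT B =====
def trim_stdout_alt (lines : List String) (evidence_line_numbers : List Int) : List String × Bool × Int :=
  let total : Int := lines.length
  if total ≤ 5 * 2 then (lines, false, total)
  else
    let ev : PySem.Set Int := PySem.Set.ofList evidence_line_numbers
    let kept := ((PySem.List.enumerate lines 0).filter
      (fun p => decide (p.1 < 5) || decide (total - 5 ≤ p.1) || ev.contains p.1)).map (·.2)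
    (kept, true, total)

-- ===== PRECONDITION & SPEC =====
def Spec_trim_stdout (lines : List String) (evidence_line_numbers : List Int) (out : List String × Bool × Int) : Prop := out = trim_stdout_alt lines evidence_line_numbers
instance (lines : List String) (evidence_line_numbers : List Int) (out : List String × Bool × Int) : Decidable (Spec_trim_stdout lines evidence_line_numbers out) := by unfold Spec_trim_stdout; infer_instance

-- ===== CLAIM (what is proved, stated in full; the proofs are below) =====
def Claim_equal_trim_stdout : Prop := ∀ (lines : List String) (evidence_line_numbers : List Int), Dom_trim_stdout lines evidence_line_numbers → Spec_trim_stdout lines evidence_line_numbers (trim_stdout lines evidence_line_numbers)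

-- ===== LEMMAS AND PROOFS =====

-- The index lists the two programs gather from are equal: A's sorted keep-set restricted to
-- range, and B's range of indices restricted to the keep condition — both are strictly
-- increasing lists of Ints with the same membership.
theorem pv_index_lists_eq (lines : List String) (ev : List Int) (_h : ¬ ((lines.length : Int) ≤ 10)) :
    (PySem.List.sorted
        (PySem.Set.ofList (PySem.List.pyRange 0 5 1 ++ PySem.List.pyRange ((lines.length : Int) - 5) (lines.length : Int) 1 ++ ev))
        (fun x => x) false).filter
      (fun i => decide (0 ≤ i ∧ i < (lines.length : Int)))
    = (PySem.List.pyRange 0 (lines.length : Int) 1).filter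
      (fun i => decide (i < 5) || decide ((lines.length : Int) - 5 ≤ i) || (PySem.Set.ofList ev).contains i) := by
  set total : Int := (lines.length : Int) with htot
  set S := PySem.List.sorted
      (PySem.Set.ofList (PySem.List.pyRange 0 5 1 ++ PySem.List.pyRange (total - 5) total 1 ++ ev))
      (fun x => x) false with hS
  have hSlt : S.Pairwise (· < ·) := PySem.List.sorted_ofList_pairwise_lt _
  have hTlt : (PySem.List.pyRange 0 total 1).Pairwise (· < ·) := PySem.List.pairwise_lt_pyRange_one 0 total
  have hL : (S.filter (fun i => decide (0 ≤ i ∧ i < total))).Pairwise (· < ·) := hSlt.filter _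
  have hR : ((PySem.List.pyRange 0 total 1).filter
      (fun i => decide (i < 5) || decide (total - 5 ≤ i) || (PySem.Set.ofList ev).contains i)).Pairwise (· < ·) :=
    hTlt.filter _
  have hmem : ∀ i : Int,
      i ∈ S.filter (fun i => decide (0 ≤ i ∧ i < total)) ↔
      i ∈ (PySem.List.pyRange 0 total 1).filter
        (fun i => decide (i < 5) || decide (total - 5 ≤ i) || (PySem.Set.ofList ev).contains i) := by
    intro i
    simp only [List.mem_filter, hS, PySem.List.mem_sorted, PySem.Set.mem_ofList,
      List.mem_append, PySem.List.mem_pyRange_one, PySem.Set.contains_iff,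
      decide_eq_true_eq, Bool.or_eq_true]
    constructor
    · rintro ⟨hk, h0, hlt⟩
      refine ⟨⟨h0, hlt⟩, ?_⟩
      rcases hk with (⟨_, h5⟩ | ⟨h5, _⟩) | hev
      · exact Or.inl (Or.inl h5)
      · exact Or.inl (Or.inr h5)
      · exact Or.inr hev
    · rintro ⟨⟨h0, hlt⟩, hc⟩
      refine ⟨?_, h0, hlt⟩
      rcases hc with (h5 | h5) | hev
      · exact Or.inl (Or.inl ⟨h0, h5⟩)
      · exact Or.inl (Or.inr ⟨h5, hlt⟩)
      · exact Or.inr hev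
  have hperm :
      (S.filter (fun i => decide (0 ≤ i ∧ i < total))).Perm
      ((PySem.List.pyRange 0 total 1).filter
        (fun i => decide (i < 5) || decide (total - 5 ≤ i) || (PySem.Set.ofList ev).contains i)) := by
    refine (List.perm_ext_iff_of_nodup ?_ ?_).mpr hmem
    · exact hL.nodup
    · exact hR.nodup
  exact PySem.List.eq_of_perm_of_pairwise_le_of_injective (fun x => x) (fun _ _ h => h) hperm
    (hL.imp le_of_lt) (hR.imp le_of_lt)

theorem trim_stdout_eq_alt (lines : List String) (ev : List Int) :
    trim_stdout lines ev = trim_stdout_alt lines ev := by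
  unfold trim_stdout trim_stdout_alt
  by_cases h : ((lines.length : Int) ≤ 5 * 2)
  · rw [if_pos h, if_pos h]
  · rw [if_neg h, if_neg h]
    have h10 : ¬ ((lines.length : Int) ≤ 10) := by omega
    -- both kept lists are (filtered index list).map (fun i => lines[i])
    refine congrArg (fun l => (l, true, (lines.length : Int))) ?_
    rw [PySem.List.foldl_append_ite (p := fun i => 0 ≤ i ∧ i < (lines.length : Int))
      (f := fun i => PySem.List.pyGetD lines i ""), List.nil_append,
      PySem.List.enumerate_eq_map_pyRange (d := ""), List.filter_map, List.map_map]
    simp only [Function.comp_def]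
    rw [pv_index_lists_eq lines ev h10]
    rfl

-- ===== VERDICT (by name: the statement is the Claim_ definition above) =====
theorem trim_stdout_spec : Claim_equal_trim_stdout := by
  intro lines ev _
  unfold Spec_trim_stdout
  exact trim_stdout_eq_alt lines ev
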